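-- pv_equiv track=rewrite | github.com/happyrobot-ai/taskrabbit_tasker_assignment_db_populate | db_populator.py | remove_apt_from_address
-- ===== SOURCE A (Python) =====
-- def remove_apt_from_address(address):
--     """Remove 'apt' from the address."""
--     final_address = ''
--     for word in address.split(' '):
--         if word.lower() not in ['apt', 'unit', 'suite', 'building', 'floor', 'room', "apartment", "apt."]:
--             final_address += word + ' '
--         else:
--             break
--     final_address = final_address.strip()
--     return final_address
-- ===== SOURCE B (Python) =====
-- KEYWORDS = ('apt', 'unit', 'suite', 'building', 'floor', 'room', 'apartment', 'apt.')
--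
-- def remove_apt_from_address(address):
--     """Remove 'apt' from the address (find the cutoff, then join once)."""
--     words = address.split(' ')
--     idx = next((i for i, w in enumerate(words) if w.lower() in KEYWORDS), len(words))
--     return ' '.join(words[:idx]).strip()
-- ===== Notes on version B (the rewrite author's own statement) =====
-- stated objective: alternative
-- what changed: Replaces the accumulate-word-plus-space-until-break loop by a two-phase computation: find the first keyword index, then join the prefix once and strip.
import Mathlib
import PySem

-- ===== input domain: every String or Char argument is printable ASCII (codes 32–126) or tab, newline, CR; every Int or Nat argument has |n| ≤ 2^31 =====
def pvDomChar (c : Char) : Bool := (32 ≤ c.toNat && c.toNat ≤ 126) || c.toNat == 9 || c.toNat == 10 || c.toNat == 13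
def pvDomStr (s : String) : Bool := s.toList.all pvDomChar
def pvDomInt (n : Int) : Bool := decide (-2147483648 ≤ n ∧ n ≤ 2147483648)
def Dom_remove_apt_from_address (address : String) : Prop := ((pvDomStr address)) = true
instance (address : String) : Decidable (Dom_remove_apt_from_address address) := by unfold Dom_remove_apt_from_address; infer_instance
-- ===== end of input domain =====

-- B replaces A's accumulate-with-break loop by find-the-cutoff-index then a single join+strip (objective: alternative decomposition).

-- ===== PORT A =====
-- the keyword list of A's `not in [...]` test
def pvKwsA : List (List Char) :=
  ["apt".toList, "unit".toList, "suite".toList, "building".toList,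
   "floor".toList, "room".toList, "apartment".toList, "apt.".toList]

-- A's for-loop with break, accumulating `word + ' '`
def pvALoop : List (List Char) → List Char → List Char
  | [], acc => acc
  | w :: ws, acc =>
      if PySem.Chars.lower w ∈ pvKwsA then acc
      else pvALoop ws (acc ++ w ++ [' '])

def remove_apt_from_address (address : String) : String :=
  String.mk (PySem.Chars.strip (pvALoop (PySem.Chars.splitOn address.toList " ".toList) []))

-- ===== PORT B =====
-- B's KEYWORDS tuple
def pvKwsB : List (List Char) :=
  ["apt".toList, "unit".toList, "suite".toList, "building".toList,
   "floor".toList, "room".toList, "apartment".toList, "apt.".toList]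

def remove_apt_from_address_alt (address : String) : String :=
  let words := PySem.Chars.splitOn address.toList " ".toList
  let idx := (words.findIdx? (fun w => PySem.Chars.lower w ∈ pvKwsB)).getD words.length
  String.mk (PySem.Chars.strip (PySem.Chars.join " ".toList (words.take idx)))

-- ===== PRECONDITION & SPEC =====
def Spec_remove_apt_from_address (address : String) (out : String) : Prop := out = remove_apt_from_address_alt address
instance (address : String) (out : String) : Decidable (Spec_remove_apt_from_address address out) := by unfold Spec_remove_apt_from_address; infer_instance

-- ===== CLAIM (what is proved, stated in full; the proofs are below) =====
def Claim_equal_remove_apt_from_address : Prop := ∀ (address : String), Dom_remove_apt_from_address address → Spec_remove_apt_from_address address (remove_apt_from_address address)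

-- ===== LEMMAS AND PROOFS =====

-- A's loop unrolled: it appends, to the accumulator, each kept word followed by a space
theorem pvALoop_eq (ws : List (List Char)) (acc : List Char) :
    pvALoop ws acc =
      acc ++ (ws.takeWhile (fun w => PySem.Chars.lower w ∉ pvKwsA)).flatMap (· ++ [' ']) := by
  induction ws generalizing acc with
  | nil => simp [pvALoop]
  | cons w ws ih =>
      by_cases h : PySem.Chars.lower w ∈ pvKwsA
      · simp [pvALoop, h]
      · simp [pvALoop, h, ih]

-- B's cutoff prefix is the takeWhile prefix
theorem take_findIdx_eq_takeWhile (p : List Char → Bool) (ws : List (List Char)) :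
    ws.take ((ws.findIdx? p).getD ws.length) = ws.takeWhile (fun w => ! p w) := by
  induction ws with
  | nil => simp
  | cons w ws ih =>
      by_cases h : p w
      · simp [List.findIdx?_cons, h]
      · simp only [List.findIdx?_cons, h, List.takeWhile_cons]
        cases hfi : ws.findIdx? p with
        | none => simpa [hfi] using congrArg (w :: ·) (by simpa [hfi] using ih)
        | some n => simpa [hfi] using congrArg (w :: ·) (by simpa [hfi] using ih)

-- stripping ignores one trailing space
theorem strip_append_space (xs : List Char) :
    PySem.Chars.strip (xs ++ [' ']) = PySem.Chars.strip xs := by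
  unfold PySem.Chars.strip PySem.Chars.lstrip PySem.Chars.rstrip
  rw [List.dropWhile_append]
  by_cases h : (List.dropWhile PySem.Chars.isspace xs).isEmpty
  · simp [List.isEmpty_iff.mp h, PySem.Chars.isspace]
  · rw [if_neg h, List.reverse_append]
    simp [List.dropWhile_cons, show PySem.Chars.isspace ' ' = true from rfl]

-- words-plus-trailing-space equals join-with-space plus one trailing space (when nonempty)
theorem flatMap_space_eq_join (pref : List (List Char)) :
    pref.flatMap (· ++ [' ']) =
      PySem.Chars.join [' '] pref ++ (if pref = [] then [] else [' ']) := by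
  induction pref with
  | nil => simp [PySem.Chars.join_nil]
  | cons a t ih =>
      cases t with
      | nil => simp [PySem.Chars.join_singleton]
      | cons b t' =>
          simp only [List.flatMap_cons] at ih ⊢
          rw [ih, PySem.Chars.join_cons_cons]
          simp

-- ===== VERDICT (by name: the statement is the Claim_ definition above) =====
theorem remove_apt_from_address_spec : Claim_equal_remove_apt_from_address := by
  intro address _
  unfold Spec_remove_apt_from_address remove_apt_from_address remove_apt_from_address_alt
  have hkws : pvKwsB = pvKwsA := rfl
  simp only [hkws]
  rw [take_findIdx_eq_takeWhile, pvALoop_eq]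
  have hpred : (fun w => ! decide (PySem.Chars.lower w ∈ pvKwsA)) =
      (fun w : List Char => decide (PySem.Chars.lower w ∉ pvKwsA)) := by
    funext w; simp
  rw [hpred]
  set pref := (PySem.Chars.splitOn address.toList " ".toList).takeWhile
      (fun w => decide (PySem.Chars.lower w ∉ pvKwsA)) with hpref
  rw [flatMap_space_eq_join]
  by_cases h : pref = []
  · simp [h]
  · rw [if_neg h]
    simp only [List.nil_append]
    rw [strip_append_space]
    rfl
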